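-- pv_equiv track=rewrite | github.com/awslabs/mcp | src/oracle-mcp-server/awslabs/oracle_mcp_server/server.py | validate_table_name
-- ===== SOURCE A (Python) =====
-- from typing import Annotated, Any, Dict, List, Optional, Tuple
--
-- MAX_IDENTIFIER_BYTES = 128
--
-- MAX_PARTS = 3
--
-- def _parse_identifier_parts(table_name: str) -> Optional[list[tuple[str, bool]]]:
--     """Parse a possibly-qualified Oracle table name into its identifier parts.
--
--     Oracle uses double-quote delimited identifiers (standard ANSI SQL).
--     Returns a list of (identifier_text, was_quoted) tuples, or None on parse error.
--     """
--     parts: list[tuple[str, bool]] = []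
--     pos = 0
--     length = len(table_name)
--
--     while pos < length:
--         if table_name[pos] == '"':
--             pos += 1
--             content = []
--             while pos < length:
--                 ch = table_name[pos]
--                 if ch == '\0':
--                     return None
--                 if ch == '"':
--                     if pos + 1 < length and table_name[pos + 1] == '"':
--                         content.append('"')
--                         pos += 2
--                     else:
--                         pos += 1
--                         break
--                 else:
--                     content.append(ch)
--                     pos += 1
--             else:
--                 return None
--             identifier = ''.join(content)
--             if not identifier:
--                 return None
--             parts.append((identifier, True))
--         else:
--             ch = table_name[pos]
--             if not (ch.isalpha() or ch == '_'):
--                 return None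
--             start = pos
--             pos += 1
--             while pos < length:
--                 ch = table_name[pos]
--                 if ch.isalpha() or ch.isdigit() or ch in ('_', '$', '#'):
--                     pos += 1
--                 else:
--                     break
--             parts.append((table_name[start:pos], False))
--
--         if pos < length:
--             if table_name[pos] == '.':
--                 pos += 1
--                 if pos >= length:
--                     return None
--             else:
--                 return None
--
--     return parts if parts else None
--
-- def validate_table_name(table_name: str | None) -> bool:
--     """Validate an Oracle table name reference."""
--     if not table_name:
--         return False
--     parts = _parse_identifier_parts(table_name)
--     if parts is None:
--         return False
--     if len(parts) > MAX_PARTS: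
--         return False
--     for text, _quoted in parts:
--         if len(text.encode('utf-8')) > MAX_IDENTIFIER_BYTES:
--             return False
--     return True
-- ===== SOURCE B (Python) =====
-- MAX_IDENTIFIER_BYTES = 128
--
-- MAX_PARTS = 3
--
--
-- def validate_table_name(table_name):
--     """Validate an Oracle table name reference (single-pass DFA)."""
--     if not table_name:
--         return False
--     START, UNQ, QUO, QSEEN, DEAD = 0, 1, 2, 3, 4
--     state, n, cnt = START, 0, 0
--     for ch in table_name:
--         if state == START:
--             if ch == '"':
--                 state, n = QUO, 0
--             elif ch.isalpha() or ch == '_':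
--                 state, n = UNQ, len(ch.encode('utf-8'))
--             else:
--                 state = DEAD
--         elif state == UNQ:
--             if ch.isalpha() or ch.isdigit() or ch in ('_', '$', '#'):
--                 n += len(ch.encode('utf-8'))
--             elif ch == '.':
--                 if n <= MAX_IDENTIFIER_BYTES and cnt + 1 <= MAX_PARTS:
--                     state, n, cnt = START, 0, cnt + 1
--                 else:
--                     state = DEAD
--             else:
--                 state = DEAD
--         elif state == QUO:
--             if ch == '\0':
--                 state = DEAD
--             elif ch == '"':
--                 state = QSEEN
--             else:
--                 n += len(ch.encode('utf-8'))
--         elif state == QSEEN: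
--             if ch == '"':
--                 state, n = QUO, n + 1
--             elif ch == '.':
--                 if 1 <= n <= MAX_IDENTIFIER_BYTES and cnt + 1 <= MAX_PARTS:
--                     state, n, cnt = START, 0, cnt + 1
--                 else:
--                     state = DEAD
--             else:
--                 state = DEAD
--     if state == UNQ:
--         return n <= MAX_IDENTIFIER_BYTES and cnt + 1 <= MAX_PARTS
--     if state == QSEEN:
--         return 1 <= n <= MAX_IDENTIFIER_BYTES and cnt + 1 <= MAX_PARTS
--     return False
-- ===== Notes on version B (the rewrite author's own statement) =====
-- stated objective: alternative
-- what changed: Replaced the position-scanning parser (nested while loops building a parts list, then separate count/byte-length checks over that list) with a single-pass five-state DFA over the characters that carries only (state, current-part byte length, parts-finished count) and validates length and part-count limits at each part boundary, never materializing the parts.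
import Mathlib
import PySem

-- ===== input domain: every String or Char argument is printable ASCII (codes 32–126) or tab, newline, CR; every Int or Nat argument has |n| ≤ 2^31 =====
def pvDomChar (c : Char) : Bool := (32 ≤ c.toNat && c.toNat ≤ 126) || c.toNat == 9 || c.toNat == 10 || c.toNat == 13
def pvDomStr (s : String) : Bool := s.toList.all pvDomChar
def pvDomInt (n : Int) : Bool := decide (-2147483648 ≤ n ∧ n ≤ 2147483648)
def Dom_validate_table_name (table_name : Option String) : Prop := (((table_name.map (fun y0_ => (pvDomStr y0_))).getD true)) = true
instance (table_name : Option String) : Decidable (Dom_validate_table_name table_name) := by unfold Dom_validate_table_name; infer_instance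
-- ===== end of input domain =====

-- B replaces A's position-scanning parser (which materializes the identifier parts and checks
-- count/byte-length afterwards) by a single-pass five-state DFA carrying only
-- (state, current part byte length, finished part count); same results, similar cost.

-- ===== PORT A =====
-- len(text.encode('utf-8')) of a list of chars (exact: sum of per-char UTF-8 sizes)
def pvUtf8Len (l : List Char) : Nat := (l.map Char.utf8Size).sum

-- ch.isalpha() or ch.isdigit() or ch in ('_', '$', '#')
def pvIdentChar (c : Char) : Bool :=
  PySem.Chars.isalpha c || PySem.Chars.isdigit c || (c = '_' || c = '$' || c = '#')

-- inner while loop of the unquoted branch: consume identifier chars, return (consumed, rest)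
def pvScanIdent : List Char → List Char × List Char
  | [] => ([], [])
  | c :: rest =>
    if pvIdentChar c then
      let p := pvScanIdent rest
      (c :: p.1, p.2)
    else ([], c :: rest)

-- inner while loop of the quoted branch: content accumulator `acc`; returns (identifier, rest
-- after the closing quote) or none (NUL character / unterminated quote)
def pvParseQuoted : List Char → List Char → Option (List Char × List Char)
  | [], _ => none
  | c :: rest, acc =>
    if c = Char.ofNat 0 then none
    else if c = '"' then
      match rest with
      | '"' :: rest2 => pvParseQuoted rest2 (acc ++ ['"'])
      | _ => some (acc, rest)
    else pvParseQuoted rest (acc ++ [c])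

theorem pvPQ_nul (rest acc : List Char) : pvParseQuoted (Char.ofNat 0 :: rest) acc = none := by
  rw [pvParseQuoted.eq_def]
  dsimp only
  rw [if_pos rfl]

theorem pvPQ_esc (rest2 acc : List Char) :
    pvParseQuoted ('"' :: '"' :: rest2) acc = pvParseQuoted rest2 (acc ++ ['"']) := by
  rw [pvParseQuoted.eq_def]
  dsimp only
  rw [if_neg (by decide), if_pos rfl]
  rfl

theorem pvPQ_close (rest acc : List Char) (h : ∀ r2, rest ≠ '"' :: r2) :
    pvParseQuoted ('"' :: rest) acc = some (acc, rest) := by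
  rw [pvParseQuoted.eq_def]
  dsimp only
  rw [if_neg (by decide), if_pos rfl]
  cases rest with
  | nil => rfl
  | cons d r3 =>
    have hd : ¬ d = '"' := fun hdd => h r3 (by rw [hdd])
    first
    | rfl
    | simp [hd]
    | (split <;> first | rfl | (rename_i heq; exact absurd heq (h _)))

theorem pvPQ_other (c : Char) (rest acc : List Char) (h0 : ¬ c = Char.ofNat 0) (h1 : ¬ c = '"') :
    pvParseQuoted (c :: rest) acc = pvParseQuoted rest (acc ++ [c]) := by
  rw [pvParseQuoted.eq_def]
  dsimp only
  rw [if_neg h0, if_neg h1]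

-- termination measure fact for pvParseParts (cited by its decreasing_by)
theorem pvParseQuoted_rest_length :
    ∀ (rest acc id rest' : List Char), pvParseQuoted rest acc = some (id, rest') →
      rest'.length < rest.length := by
  intro rest acc
  induction rest, acc using pvParseQuoted.induct with
  | case1 x => intro id rest' h; cases h
  | case2 rest acc => intro id rest' h; rw [pvPQ_nul] at h; cases h
  | case3 acc rest2 h0 ih =>
    intro id rest' h
    rw [pvPQ_esc] at h
    have := ih id rest' h
    simp
    omega
  | case4 rest acc hne h0 =>
    intro id rest' h
    rw [pvPQ_close rest acc (fun r2 hr => hne r2 hr)] at h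
    simp at h
    rw [← h.2]
    simp
  | case5 c rest acc h0 h1 ih =>
    intro id rest' h
    rw [pvPQ_other c rest acc h0 h1] at h
    have := ih id rest' h
    simp
    omega

-- termination measure fact for pvParseParts (cited by its decreasing_by)
theorem pvScanIdent_rest_length : ∀ (rest : List Char), (pvScanIdent rest).2.length ≤ rest.length := by
  intro rest
  induction rest with
  | nil => simp [pvScanIdent]
  | cons c r ih =>
    by_cases h : pvIdentChar c = true
    · simp [pvScanIdent, h]; omega
    · simp [pvScanIdent, h]

-- outer while loop of _parse_identifier_parts: `rest` is the unread suffix, `parts` the list so far;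
-- the `pos < length` / `table_name[pos] == '.'` checks after a part become head?/tail tests on `rest'`
def pvParseParts (rest : List Char) (parts : List (List Char × Bool)) :
    Option (List (List Char × Bool)) :=
  match rest with
  | [] => if parts.isEmpty then none else some parts
  | c :: rtail =>
    if c = '"' then
      match hq : pvParseQuoted rtail [] with
      | none => none
      | some (id, rest') =>
        if id.isEmpty then none
        else
          if rest'.isEmpty then some (parts ++ [(id, true)])
          else if rest'.head? = some '.' then
            if rest'.tail.isEmpty then none
            else pvParseParts rest'.tail (parts ++ [(id, true)])
          else none
    else if PySem.Chars.isalpha c || c = '_' then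
      let p := pvScanIdent rtail
      if p.2.isEmpty then some (parts ++ [(c :: p.1, false)])
      else if p.2.head? = some '.' then
        if p.2.tail.isEmpty then none
        else pvParseParts p.2.tail (parts ++ [(c :: p.1, false)])
      else none
    else none
termination_by rest.length
decreasing_by
  · have := pvParseQuoted_rest_length rtail [] id rest' hq
    simp [List.length_tail]; omega
  · have := pvScanIdent_rest_length rtail
    simp [List.length_tail]; omega

def validate_table_name (table_name : Option String) : Bool :=
  match table_name with
  | none => false            -- `if not table_name` (None)
  | some s =>
    if s.toList.isEmpty then false    -- `if not table_name` (empty string)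
    else
      match pvParseParts s.toList [] with
      | none => false
      | some parts =>
        if parts.length > 3 then false
        else if parts.any (fun p => 128 < pvUtf8Len p.1) then false
        else true

-- ===== PORT B =====
-- DFA state (mode, n, cnt): mode 0 = START, 1 = UNQ, 2 = QUO, 3 = QSEEN, 4 = DEAD;
-- n = UTF-8 byte length of the current part, cnt = number of finished parts
def pvStep (st : Nat × Nat × Nat) (ch : Char) : Nat × Nat × Nat :=
  match st with
  | (m, n, cnt) =>
    if m = 0 then
      if ch = '"' then (2, 0, cnt)
      else if PySem.Chars.isalpha ch || ch = '_' then (1, ch.utf8Size, cnt)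
      else (4, n, cnt)
    else if m = 1 then
      if pvIdentChar ch then (1, n + ch.utf8Size, cnt)
      else if ch = '.' then
        if n ≤ 128 && cnt + 1 ≤ 3 then (0, 0, cnt + 1) else (4, n, cnt)
      else (4, n, cnt)
    else if m = 2 then
      if ch = Char.ofNat 0 then (4, n, cnt)
      else if ch = '"' then (3, n, cnt)
      else (2, n + ch.utf8Size, cnt)
    else if m = 3 then
      if ch = '"' then (2, n + 1, cnt)
      else if ch = '.' then
        if 1 ≤ n && n ≤ 128 && cnt + 1 ≤ 3 then (0, 0, cnt + 1) else (4, n, cnt)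
      else (4, n, cnt)
    else (4, n, cnt)

def pvFinal (st : Nat × Nat × Nat) : Bool :=
  match st with
  | (m, n, cnt) =>
    if m = 1 then n ≤ 128 && cnt + 1 ≤ 3
    else if m = 3 then 1 ≤ n && n ≤ 128 && cnt + 1 ≤ 3
    else false

def validate_table_name_alt (table_name : Option String) : Bool :=
  match table_name with
  | none => false
  | some s =>
    if s.toList.isEmpty then false
    else pvFinal (s.toList.foldl pvStep (0, 0, 0))

-- ===== PRECONDITION & SPEC =====
def Spec_validate_table_name (table_name : Option String) (out : Bool) : Prop := out = validate_table_name_alt table_name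
instance (table_name : Option String) (out : Bool) : Decidable (Spec_validate_table_name table_name out) := by unfold Spec_validate_table_name; infer_instance

-- ===== CLAIM (what is proved, stated in full; the proofs are below) =====
def Claim_equal_validate_table_name : Prop := ∀ (table_name : Option String), Dom_validate_table_name table_name → Spec_validate_table_name table_name (validate_table_name table_name)

-- ===== LEMMAS AND PROOFS =====

-- A's final checks (count ≤ MAX_PARTS, every part ≤ MAX_IDENTIFIER_BYTES) applied to a parse result
def pvAres (o : Option (List (List Char × Bool))) : Bool :=
  match o with
  | none => false
  | some parts =>
    if parts.length > 3 then false
    else if parts.any (fun p => 128 < pvUtf8Len p.1) then false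
    else true

theorem pvUtf8Len_nil : pvUtf8Len [] = 0 := rfl

theorem pvQSize : ('"' : Char).utf8Size = 1 := by decide

theorem pvUtf8Len_cons (c : Char) (l : List Char) :
    pvUtf8Len (c :: l) = c.utf8Size + pvUtf8Len l := by simp [pvUtf8Len]

theorem pvUtf8Len_pos (l : List Char) (h : l ≠ []) : 1 ≤ pvUtf8Len l := by
  cases l with
  | nil => exact absurd rfl h
  | cons c r =>
    rw [pvUtf8Len_cons]
    have := Char.utf8Size_pos c
    omega

theorem pvDot_not_ident : pvIdentChar '.' = false := by decide

-- branch-wise unfolding lemmas for the WF-recursive pvParseParts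
theorem pvParseParts_nil (parts : List (List Char × Bool)) :
    pvParseParts [] parts = if parts.isEmpty then none else some parts := by
  rw [pvParseParts.eq_def]

theorem pvParseParts_quote_none (rest : List Char) (parts : List (List Char × Bool))
    (hq : pvParseQuoted rest [] = none) : pvParseParts ('"' :: rest) parts = none := by
  rw [pvParseParts.eq_def]
  dsimp only
  rw [if_pos rfl]
  split
  · rfl
  · next id2 rest2 heq => rw [hq] at heq; cases heq

theorem pvParseParts_quote_some (rest : List Char) (parts : List (List Char × Bool))
    (id rest' : List Char) (hq : pvParseQuoted rest [] = some (id, rest')) :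
    pvParseParts ('"' :: rest) parts =
      (if id.isEmpty then none
       else if rest'.isEmpty then some (parts ++ [(id, true)])
       else if rest'.head? = some '.' then
         if rest'.tail.isEmpty then none
         else pvParseParts rest'.tail (parts ++ [(id, true)])
       else none) := by
  rw [pvParseParts.eq_def]
  dsimp only
  rw [if_pos rfl]
  split
  · next heq => rw [hq] at heq; cases heq
  · next id2 rest2 heq =>
    rw [hq] at heq
    injection heq with h
    injection h with h1 h2
    rw [h1, h2]

theorem pvParseParts_alpha (c : Char) (rest : List Char) (parts : List (List Char × Bool))
    (hc : ¬ c = '"') (ha : (PySem.Chars.isalpha c || c = '_') = true) :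
    pvParseParts (c :: rest) parts =
      (if (pvScanIdent rest).2.isEmpty then some (parts ++ [(c :: (pvScanIdent rest).1, false)])
       else if (pvScanIdent rest).2.head? = some '.' then
         if (pvScanIdent rest).2.tail.isEmpty then none
         else pvParseParts (pvScanIdent rest).2.tail (parts ++ [(c :: (pvScanIdent rest).1, false)])
       else none) := by
  rw [pvParseParts.eq_def]
  dsimp only
  rw [if_neg hc, if_pos ha]

theorem pvParseParts_other (c : Char) (rest : List Char) (parts : List (List Char × Bool))
    (hc : ¬ c = '"') (ha : ¬ (PySem.Chars.isalpha c || c = '_') = true) :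
    pvParseParts (c :: rest) parts = none := by
  rw [pvParseParts.eq_def]
  dsimp only
  rw [if_neg hc, if_neg ha]

-- badness of the accumulated parts is preserved by appending
theorem pvBad_append {parts : List (List Char × Bool)} (x : List Char × Bool)
    (h : 3 < parts.length ∨ ∃ p ∈ parts, 128 < pvUtf8Len p.1) :
    3 < (parts ++ [x]).length ∨ ∃ p ∈ parts ++ [x], 128 < pvUtf8Len p.1 := by
  rcases h with h | ⟨p, hp, h⟩
  · left; simp; omega
  · right; exact ⟨p, by simp [hp], h⟩

theorem pvAres_bad {parts : List (List Char × Bool)}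
    (h : 3 < parts.length ∨ ∃ p ∈ parts, 128 < pvUtf8Len p.1) :
    pvAres (some parts) = false := by
  rcases h with h | ⟨p, hp, hlt⟩
  · simp [pvAres, h]
  · have hany : (parts.any (fun p => decide (128 < pvUtf8Len p.1))) = true :=
      List.any_eq_true.mpr ⟨p, hp, by simpa using hlt⟩
    by_cases h3 : parts.length > 3
    · simp [pvAres, h3]
    · simp [pvAres, h3, hany]

theorem pvAres_append (parts : List (List Char × Bool)) (x : List Char × Bool)
    (h3 : parts.length ≤ 3) (hall : ∀ p ∈ parts, pvUtf8Len p.1 ≤ 128) :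
    pvAres (some (parts ++ [x]))
      = (decide (pvUtf8Len x.1 ≤ 128) && decide (parts.length + 1 ≤ 3)) := by
  have hany : parts.any (fun p => 128 < pvUtf8Len p.1) = false := by
    simp only [List.any_eq_false, decide_eq_true_eq]
    intro p hp
    exact Nat.not_lt.mpr (hall p hp)
  by_cases hx : pvUtf8Len x.1 ≤ 128 <;> by_cases hl : parts.length + 1 ≤ 3 <;>
    simp [pvAres, hany, hx, hl] <;> omega

theorem pvFoldl_dead : ∀ (l : List Char) (n cnt : Nat), l.foldl pvStep (4, n, cnt) = (4, n, cnt) := by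
  intro l
  induction l with
  | nil => intro n cnt; rfl
  | cons c r ih =>
    intro n cnt
    rw [List.foldl_cons]
    have : pvStep (4, n, cnt) c = (4, n, cnt) := rfl
    rw [this]
    exact ih n cnt

-- a successful quoted scan moves the DFA from QUO to QSEEN over the same characters
theorem pvSQ1 : ∀ (rest acc : List Char), ∀ (id rest' : List Char) (cnt : Nat),
    pvParseQuoted rest acc = some (id, rest') →
    rest.foldl pvStep (2, pvUtf8Len acc, cnt) = rest'.foldl pvStep (3, pvUtf8Len id, cnt) := by
  intro rest acc
  induction rest, acc using pvParseQuoted.induct with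
  | case1 x => intro id rest' cnt h; cases h
  | case2 rest acc => intro id rest' cnt h; rw [pvPQ_nul] at h; cases h
  | case3 acc rest2 h0 ih =>
    intro id rest' cnt h
    rw [pvPQ_esc] at h
    rw [List.foldl_cons, List.foldl_cons]
    have s1 : pvStep (2, pvUtf8Len acc, cnt) '"' = (3, pvUtf8Len acc, cnt) := by
      simp [pvStep]
    have s2 : pvStep (3, pvUtf8Len acc, cnt) '"' = (2, pvUtf8Len acc + 1, cnt) := by
      simp [pvStep]
    rw [s1, s2]
    have hlen : pvUtf8Len (acc ++ ['"']) = pvUtf8Len acc + 1 := by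
      simp [pvUtf8Len, pvQSize]
    rw [← hlen]
    exact ih id rest' cnt h
  | case4 rest acc hne h0 =>
    intro id rest' cnt h
    rw [pvPQ_close rest acc (fun r2 hr => hne r2 hr)] at h
    simp at h
    rw [List.foldl_cons]
    have s1 : pvStep (2, pvUtf8Len acc, cnt) '"' = (3, pvUtf8Len acc, cnt) := by
      simp [pvStep]
    rw [s1, h.1, h.2]
  | case5 c rest acc h0 h1 ih =>
    intro id rest' cnt h
    rw [pvPQ_other c rest acc h0 h1] at h
    rw [List.foldl_cons]
    have s1 : pvStep (2, pvUtf8Len acc, cnt) c = (2, pvUtf8Len acc + c.utf8Size, cnt) := by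
      simp [pvStep, h0, h1]
    rw [s1]
    have hlen : pvUtf8Len (acc ++ [c]) = pvUtf8Len acc + c.utf8Size := by
      simp [pvUtf8Len]
    rw [← hlen]
    exact ih id rest' cnt h

-- a failed quoted scan (NUL or unterminated) makes the DFA reject
theorem pvSQ2 : ∀ (rest acc : List Char), ∀ (k cnt : Nat),
    pvParseQuoted rest acc = none →
    pvFinal (rest.foldl pvStep (2, k, cnt)) = false := by
  intro rest acc
  induction rest, acc using pvParseQuoted.induct with
  | case1 x => intro k cnt _; rfl
  | case2 rest acc =>
    intro k cnt _
    rw [List.foldl_cons]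
    have s1 : pvStep (2, k, cnt) (Char.ofNat 0) = (4, k, cnt) := by
      simp [pvStep]
    rw [s1, pvFoldl_dead]
    rfl
  | case3 acc rest2 h0 ih =>
    intro k cnt h
    rw [pvPQ_esc] at h
    rw [List.foldl_cons, List.foldl_cons]
    have s1 : pvStep (2, k, cnt) '"' = (3, k, cnt) := by simp [pvStep]
    have s2 : pvStep (3, k, cnt) '"' = (2, k + 1, cnt) := by simp [pvStep]
    rw [s1, s2]
    exact ih (k + 1) cnt h
  | case4 rest acc hne h0 =>
    intro k cnt h
    rw [pvPQ_close rest acc (fun r2 hr => hne r2 hr)] at h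
    cases h
  | case5 c rest acc h0 h1 ih =>
    intro k cnt h
    rw [pvPQ_other c rest acc h0 h1] at h
    rw [List.foldl_cons]
    have s1 : pvStep (2, k, cnt) c = (2, k + c.utf8Size, cnt) := by
      simp [pvStep, h0, h1]
    rw [s1]
    exact ih (k + c.utf8Size) cnt h

-- the suffix after a closing quote never starts with another quote
theorem pvPQhead : ∀ (rest acc : List Char), ∀ (id rest' : List Char),
    pvParseQuoted rest acc = some (id, rest') →
    rest' = [] ∨ ∃ c r2, rest' = c :: r2 ∧ ¬ c = '"' := by
  intro rest acc
  induction rest, acc using pvParseQuoted.induct with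
  | case1 x => intro id rest' h; cases h
  | case2 rest acc => intro id rest' h; rw [pvPQ_nul] at h; cases h
  | case3 acc rest2 h0 ih =>
    intro id rest' h
    rw [pvPQ_esc] at h
    exact ih id rest' h
  | case4 rest acc hne h0 =>
    intro id rest' h
    rw [pvPQ_close rest acc (fun r2 hr => hne r2 hr)] at h
    simp at h
    cases hr : rest with
    | nil => left; rw [← h.2, hr]
    | cons d r2 =>
      right
      refine ⟨d, r2, by rw [← h.2, hr], ?_⟩
      intro hd
      exact hne r2 (by rw [hr, hd])
  | case5 c rest acc h0 h1 ih =>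
    intro id rest' h
    rw [pvPQ_other c rest acc h0 h1] at h
    exact ih id rest' h

-- the unquoted scan advances the DFA inside state UNQ, adding the scanned bytes
theorem pvSU1 : ∀ (rest : List Char) (n cnt : Nat),
    rest.foldl pvStep (1, n, cnt)
      = (pvScanIdent rest).2.foldl pvStep (1, n + pvUtf8Len (pvScanIdent rest).1, cnt) := by
  intro rest
  induction rest with
  | nil => intro n cnt; simp [pvScanIdent, pvUtf8Len_nil]
  | cons c r ih =>
    intro n cnt
    by_cases hc : pvIdentChar c = true
    · rw [List.foldl_cons]
      have s1 : pvStep (1, n, cnt) c = (1, n + c.utf8Size, cnt) := by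
        simp [pvStep, hc]
      rw [s1]
      rw [ih (n + c.utf8Size) cnt]
      simp [pvScanIdent, hc, pvUtf8Len_cons]
      ring_nf
    · simp [pvScanIdent, hc, pvUtf8Len_nil]

-- the suffix after the unquoted scan never starts with an identifier character
theorem pvSUhead : ∀ (rest : List Char),
    (pvScanIdent rest).2 = [] ∨ ∃ c r2, (pvScanIdent rest).2 = c :: r2 ∧ pvIdentChar c = false := by
  intro rest
  induction rest with
  | nil => left; rfl
  | cons c r ih =>
    by_cases hc : pvIdentChar c = true
    · simpa [pvScanIdent, hc] using ih
    · right
      exact ⟨c, r, by simp [pvScanIdent, hc], by simpa using hc⟩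

-- once the accumulated parts already violate a final check, A rejects whatever follows
theorem pvML2 : ∀ (rest : List Char) (parts : List (List Char × Bool)),
    (3 < parts.length ∨ ∃ p ∈ parts, 128 < pvUtf8Len p.1) →
    pvAres (pvParseParts rest parts) = false := by
  intro rest parts
  induction rest, parts using pvParseParts.induct with
  | case1 parts hp => intro hbad; rw [pvParseParts_nil, if_pos hp]; rfl
  | case2 parts hp =>
    intro hbad
    rw [pvParseParts_nil, if_neg hp]
    exact pvAres_bad hbad
  | case3 parts rest hq => intro hbad; rw [pvParseParts_quote_none rest parts hq]; rfl
  | case4 parts rest id rest' hq hid =>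
    intro hbad
    rw [pvParseParts_quote_some rest parts id rest' hq]
    simp [hid, pvAres]
  | case5 parts rest id rest' hq hid hre =>
    intro hbad
    rw [pvParseParts_quote_some rest parts id rest' hq]
    simp [hid, hre]
    exact pvAres_bad (pvBad_append _ hbad)
  | case6 parts rest id rest' hq hid hre hdot htail =>
    intro hbad
    rw [pvParseParts_quote_some rest parts id rest' hq]
    simp [hid, hre, hdot, htail, pvAres]
  | case7 parts rest id rest' hq hid hre hdot htail ih =>
    intro hbad
    rw [pvParseParts_quote_some rest parts id rest' hq]
    simp [hid, hre, hdot, htail]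
    exact ih (pvBad_append _ hbad)
  | case8 parts rest id rest' hq hid hre hdot =>
    intro hbad
    rw [pvParseParts_quote_some rest parts id rest' hq]
    simp [hid, hre, hdot, pvAres]
  | case9 parts c rest hc ha pp hemp =>
    intro hbad
    have hpd : pp = pvScanIdent rest := rfl
    rw [hpd] at hemp
    rw [pvParseParts_alpha c rest parts hc ha, if_pos hemp]
    exact pvAres_bad (pvBad_append _ hbad)
  | case10 parts c rest hc ha pp hemp hdot htail =>
    intro hbad
    have hpd : pp = pvScanIdent rest := rfl
    rw [hpd] at hemp hdot htail
    rw [pvParseParts_alpha c rest parts hc ha]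
    simp [hemp, hdot, htail, pvAres]
  | case11 parts c rest hc ha pp hemp hdot htail ih =>
    intro hbad
    have hpd : pp = pvScanIdent rest := rfl
    rw [hpd] at hemp hdot htail
    rw [pvParseParts_alpha c rest parts hc ha]
    simp [hemp, hdot, htail]
    exact ih (pvBad_append _ hbad)
  | case12 parts c rest hc ha pp hemp hdot =>
    intro hbad
    have hpd : pp = pvScanIdent rest := rfl
    rw [hpd] at hemp hdot
    rw [pvParseParts_alpha c rest parts hc ha]
    simp [hemp, hdot, pvAres]
  | case13 parts c rest hc ha =>
    intro hbad
    rw [pvParseParts_other c rest parts hc ha]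
    rfl

-- finishing a part on '.' never leaves the DFA in an accepting state at end of input
theorem pvDotEnd1 (n cnt : Nat) : pvFinal (pvStep (1, n, cnt) '.') = false := by
  cases hb : decide (n ≤ 128) <;> cases hc : decide (cnt + 1 ≤ 3) <;>
    simp [pvStep, pvDot_not_ident, pvFinal, hb, hc] <;> split <;> simp

theorem pvDotEnd3 (n cnt : Nat) : pvFinal (pvStep (3, n, cnt) '.') = false := by
  cases ha : decide (1 ≤ n) <;> cases hb : decide (n ≤ 128) <;> cases hc : decide (cnt + 1 ≤ 3) <;>
    simp [pvStep, pvFinal, ha, hb, hc] <;> split <;> simp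

-- MAIN INVARIANT: with ≤ 3 good parts already parsed, A's final verdict on the remaining input
-- equals the DFA's verdict started in START with cnt = number of parsed parts
theorem pvML1 : ∀ (rest : List Char) (parts : List (List Char × Bool)),
    rest ≠ [] → parts.length ≤ 3 → (∀ p ∈ parts, pvUtf8Len p.1 ≤ 128) →
    pvAres (pvParseParts rest parts) = pvFinal (rest.foldl pvStep (0, 0, parts.length)) := by
  intro rest parts
  induction rest, parts using pvParseParts.induct with
  | case1 parts hp => intro hne _ _; exact absurd rfl hne
  | case2 parts hp => intro hne _ _; exact absurd rfl hne
  | case3 parts rest hq =>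
    intro _ h3 hall
    rw [pvParseParts_quote_none rest parts hq, List.foldl_cons]
    have s1 : pvStep (0, 0, parts.length) '"' = (2, 0, parts.length) := by simp [pvStep]
    rw [s1]
    exact (pvSQ2 rest [] 0 parts.length hq).symm
  | case4 parts rest id rest' hq hid =>
    intro _ h3 hall
    rw [pvParseParts_quote_some rest parts id rest' hq]
    simp only [hid, if_pos]
    have hid' : id = [] := by simpa using hid
    rw [List.foldl_cons]
    have s1 : pvStep (0, 0, parts.length) '"' = (2, 0, parts.length) := by simp [pvStep]
    rw [s1]
    have hrun := pvSQ1 rest [] id rest' parts.length hq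
    rw [pvUtf8Len_nil] at hrun
    rw [hrun, hid', pvUtf8Len_nil]
    rcases pvPQhead rest [] id rest' hq with hE | ⟨c', r2, hE, hcq⟩
    · rw [hE]; rfl
    · rw [hE, List.foldl_cons]
      have s2 : pvStep (3, 0, parts.length) c' = (4, 0, parts.length) := by
        by_cases hd : c' = '.'
        · subst hd; simp [pvStep]
        · simp [pvStep, hcq, hd]
      rw [s2, pvFoldl_dead]
      rfl
  | case5 parts rest id rest' hq hid hre =>
    intro _ h3 hall
    rw [pvParseParts_quote_some rest parts id rest' hq]
    have hre' : rest' = [] := by simpa using hre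
    simp only [hid, hre, if_neg, if_pos, Bool.not_eq_true]
    rw [List.foldl_cons]
    have s1 : pvStep (0, 0, parts.length) '"' = (2, 0, parts.length) := by simp [pvStep]
    rw [s1]
    have hrun := pvSQ1 rest [] id rest' parts.length hq
    rw [pvUtf8Len_nil] at hrun
    rw [hrun, hre']
    have hpos : 1 ≤ pvUtf8Len id := pvUtf8Len_pos id (by simpa using hid)
    rw [pvAres_append parts (id, true) h3 hall]
    simp only [List.foldl_nil]
    rw [Bool.eq_iff_iff]
    simp [pvFinal]
    omega
  | case6 parts rest id rest' hq hid hre hdot htail =>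
    intro _ h3 hall
    rw [pvParseParts_quote_some rest parts id rest' hq]
    rw [List.foldl_cons]
    have s1 : pvStep (0, 0, parts.length) '"' = (2, 0, parts.length) := by simp [pvStep]
    rw [s1]
    have hrun := pvSQ1 rest [] id rest' parts.length hq
    rw [pvUtf8Len_nil] at hrun
    rw [hrun]
    cases rest' with
    | nil => simp at hre
    | cons c' r2 =>
      have hc' : c' = '.' := by simpa using hdot
      have hr2 : r2 = [] := by simpa using htail
      subst hc'; subst hr2
      simp [hid, pvAres, pvDotEnd3]
  | case7 parts rest id rest' hq hid hre hdot htail ih =>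
    intro _ h3 hall
    rw [pvParseParts_quote_some rest parts id rest' hq]
    rw [List.foldl_cons]
    have s1 : pvStep (0, 0, parts.length) '"' = (2, 0, parts.length) := by simp [pvStep]
    rw [s1]
    have hrun := pvSQ1 rest [] id rest' parts.length hq
    rw [pvUtf8Len_nil] at hrun
    rw [hrun]
    cases rest' with
    | nil => simp at hre
    | cons c' r2 =>
      have hc' : c' = '.' := by simpa using hdot
      subst hc'
      have hpos : 1 ≤ pvUtf8Len id := pvUtf8Len_pos id (by simpa using hid)
      have htail' : ¬ r2.isEmpty = true := by simpa using htail
      rw [List.foldl_cons]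
      by_cases hok : pvUtf8Len id ≤ 128 ∧ parts.length + 1 ≤ 3
      · have s2 : pvStep (3, pvUtf8Len id, parts.length) '.' = (0, 0, parts.length + 1) := by
          simp [pvStep, hpos, hok.1, hok.2]
        rw [s2]
        have hrec := ih (by simpa using htail')
          (by simp; omega)
          (by intro p hp
              rcases List.mem_append.mp hp with h | h
              · exact hall p h
              · simp at h; rw [h]; exact hok.1)
        simp only [List.tail_cons] at hrec
        simp only [List.length_append, List.length_cons, List.length_nil, Nat.zero_add] at hrec
        simp [hid, hre, htail', hrec]
      · have s2 : pvStep (3, pvUtf8Len id, parts.length) '.' = (4, pvUtf8Len id, parts.length) := by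
          cases hb : decide (pvUtf8Len id ≤ 128) <;> cases hc2 : decide (parts.length + 1 ≤ 3) <;>
            simp [pvStep, hpos, hb, hc2] <;>
            first
            | (simp at hb hc2; exact absurd ⟨hb, by omega⟩ hok)
            | (split <;> simp_all <;> omega)
            | (simp at hc2; omega)
        rw [s2, pvFoldl_dead]
        have hbad : 3 < (parts ++ [(id, true)]).length ∨
            ∃ p ∈ parts ++ [(id, true)], 128 < pvUtf8Len p.1 := by
          by_cases hlen : pvUtf8Len id ≤ 128
          · left; simp; omega
          · right; exact ⟨(id, true), by simp, by dsimp only; omega⟩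
        have hrec := pvML2 r2 (parts ++ [(id, true)]) hbad
        simp [hid, hre, htail', hrec, pvFinal]
  | case8 parts rest id rest' hq hid hre hdot =>
    intro _ h3 hall
    rw [pvParseParts_quote_some rest parts id rest' hq]
    rw [List.foldl_cons]
    have s1 : pvStep (0, 0, parts.length) '"' = (2, 0, parts.length) := by simp [pvStep]
    rw [s1]
    have hrun := pvSQ1 rest [] id rest' parts.length hq
    rw [pvUtf8Len_nil] at hrun
    rw [hrun]
    rcases pvPQhead rest [] id rest' hq with hE | ⟨c', r2, hE, hcq⟩
    · rw [hE] at hre; simp at hre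
    · subst hE
      have hc' : ¬ c' = '.' := by
        intro h; rw [h] at hdot; simp at hdot
      rw [List.foldl_cons]
      have s2 : pvStep (3, pvUtf8Len id, parts.length) c' = (4, pvUtf8Len id, parts.length) := by
        simp [pvStep, hcq, hc']
      rw [s2, pvFoldl_dead]
      simp [hid, hre, hc', pvAres, pvFinal]
  | case9 parts c rest hc ha pp hemp =>
    intro _ h3 hall
    have hpd : pp = pvScanIdent rest := rfl
    rw [hpd] at hemp
    rw [pvParseParts_alpha c rest parts hc ha, if_pos hemp]
    rw [List.foldl_cons]
    have s1 : pvStep (0, 0, parts.length) c = (1, c.utf8Size, parts.length) := by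
      simp [pvStep, hc, ha]
    rw [s1, pvSU1 rest c.utf8Size parts.length]
    have hp' : (pvScanIdent rest).2 = [] := by simpa using hemp
    rw [hp']
    simp only [List.foldl_nil]
    rw [pvAres_append parts (c :: (pvScanIdent rest).1, false) h3 hall]
    rw [Bool.eq_iff_iff]
    simp [pvFinal, pvUtf8Len_cons]
  | case10 parts c rest hc ha pp hemp hdot htail =>
    intro _ h3 hall
    have hpd : pp = pvScanIdent rest := rfl
    rw [hpd] at hemp hdot htail
    rw [pvParseParts_alpha c rest parts hc ha]
    rw [List.foldl_cons]
    have s1 : pvStep (0, 0, parts.length) c = (1, c.utf8Size, parts.length) := by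
      simp [pvStep, hc, ha]
    rw [s1, pvSU1 rest c.utf8Size parts.length]
    cases hE : (pvScanIdent rest).2 with
    | nil => rw [hE] at hemp; simp at hemp
    | cons c' r2 =>
      rw [hE] at hdot htail
      have hc' : c' = '.' := by simpa using hdot
      have hr2 : r2 = [] := by simpa using htail
      subst hc'; subst hr2
      simp [pvAres, pvDotEnd1]
  | case11 parts c rest hc ha pp hemp hdot htail ih =>
    intro _ h3 hall
    have hpd : pp = pvScanIdent rest := rfl
    rw [hpd] at hemp hdot htail ih
    rw [pvParseParts_alpha c rest parts hc ha]
    rw [List.foldl_cons]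
    have s1 : pvStep (0, 0, parts.length) c = (1, c.utf8Size, parts.length) := by
      simp [pvStep, hc, ha]
    rw [s1, pvSU1 rest c.utf8Size parts.length]
    cases hE : (pvScanIdent rest).2 with
    | nil => rw [hE] at hemp; simp at hemp
    | cons c' r2 =>
      rw [hE] at hdot htail ih
      have hc' : c' = '.' := by simpa using hdot
      subst hc'
      have htail' : ¬ r2.isEmpty = true := by simpa using htail
      rw [List.foldl_cons]
      have hlen : c.utf8Size + pvUtf8Len (pvScanIdent rest).1
          = pvUtf8Len (c :: (pvScanIdent rest).1) := (pvUtf8Len_cons c _).symm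
      by_cases hok : pvUtf8Len (c :: (pvScanIdent rest).1) ≤ 128 ∧ parts.length + 1 ≤ 3
      · have s2 : pvStep (1, c.utf8Size + pvUtf8Len (pvScanIdent rest).1, parts.length) '.'
            = (0, 0, parts.length + 1) := by
          rw [hlen]
          simp [pvStep, pvDot_not_ident, hok.1, hok.2]
        rw [s2]
        have hrec := ih (by simpa using htail')
          (by simp; omega)
          (by intro p hp'
              rcases List.mem_append.mp hp' with h | h
              · exact hall p h
              · simp at h; rw [h]; exact hok.1)
        simp only [List.tail_cons] at hrec
        simp only [List.length_append, List.length_cons, List.length_nil, Nat.zero_add] at hrec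
        simp [htail', hrec]
      · have s2 : pvStep (1, c.utf8Size + pvUtf8Len (pvScanIdent rest).1, parts.length) '.'
            = (4, c.utf8Size + pvUtf8Len (pvScanIdent rest).1, parts.length) := by
          rw [hlen]
          cases hb : decide (pvUtf8Len (c :: (pvScanIdent rest).1) ≤ 128) <;>
            cases hc2 : decide (parts.length + 1 ≤ 3) <;>
            simp [pvStep, pvDot_not_ident, hb, hc2] <;>
            first
            | (simp at hb hc2; exact absurd ⟨hb, by omega⟩ hok)
            | (split <;> simp_all <;> omega)
            | (simp at hc2; omega)
        rw [s2, pvFoldl_dead]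
        have hbad : 3 < (parts ++ [(c :: (pvScanIdent rest).1, false)]).length ∨
            ∃ p ∈ parts ++ [(c :: (pvScanIdent rest).1, false)], 128 < pvUtf8Len p.1 := by
          by_cases hl : pvUtf8Len (c :: (pvScanIdent rest).1) ≤ 128
          · left; simp; omega
          · right; exact ⟨(c :: (pvScanIdent rest).1, false), by simp, by dsimp only; omega⟩
        have hrec := pvML2 r2 (parts ++ [(c :: (pvScanIdent rest).1, false)]) hbad
        simp [htail', hrec, pvFinal]
  | case12 parts c rest hc ha pp hemp hdot =>
    intro _ h3 hall
    have hpd : pp = pvScanIdent rest := rfl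
    rw [hpd] at hemp hdot
    rw [pvParseParts_alpha c rest parts hc ha]
    rw [List.foldl_cons]
    have s1 : pvStep (0, 0, parts.length) c = (1, c.utf8Size, parts.length) := by
      simp [pvStep, hc, ha]
    rw [s1, pvSU1 rest c.utf8Size parts.length]
    rcases pvSUhead rest with hE | ⟨c', r2, hE, hci⟩
    · rw [hE] at hemp; simp at hemp
    · rw [hE] at hdot ⊢
      have hc' : ¬ c' = '.' := by
        intro h; rw [h] at hdot; simp at hdot
      rw [List.foldl_cons]
      have s2 : pvStep (1, c.utf8Size + pvUtf8Len (pvScanIdent rest).1, parts.length) c'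
          = (4, c.utf8Size + pvUtf8Len (pvScanIdent rest).1, parts.length) := by
        simp [pvStep, hci, hc']
      rw [s2, pvFoldl_dead]
      simp [hc', pvAres, pvFinal]
  | case13 parts c rest hc ha =>
    intro _ h3 hall
    rw [pvParseParts_other c rest parts hc ha]
    rw [List.foldl_cons]
    have s1 : pvStep (0, 0, parts.length) c = (4, 0, parts.length) := by
      simp [pvStep, hc, ha]
    rw [s1, pvFoldl_dead]
    rfl

-- ===== VERDICT (by name: the statement is the Claim_ definition above) =====
theorem validate_table_name_spec : Claim_equal_validate_table_name := by
  intro t _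
  unfold Spec_validate_table_name
  match t with
  | none => rfl
  | some s =>
    unfold validate_table_name validate_table_name_alt
    by_cases h : s.toList.isEmpty
    · simp [h]
    · simp only [h, Bool.false_eq_true, if_false]
      have hne : s.toList ≠ [] := by simpa using h
      have := pvML1 s.toList [] hne (by simp) (by simp)
      simp only [List.length_nil] at this
      rw [← this]
      unfold pvAres
      match pvParseParts s.toList [] with
      | none => rfl
      | some parts => rfl
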